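-- pv_equiv track=rewrite | github.com/rnjstpwls/swea | D3/D3_1493.py | inverse_sharp
-- ===== SOURCE A (Python) =====
-- def sharp(x,y):
--     tmp = x + y - 2
--     return tmp*(tmp+1)//2 + x
--
-- def inverse_sharp(num):
--     for i in range(1,300):
--         for j in range(1,300):
--             tmp = sharp(i,j)
--             if tmp == num:
--                 return (i,j)
--             if tmp > num:
--                 break
-- ===== SOURCE B (Python) =====
-- def inverse_sharp(num):
--     # Direct inversion of the Cantor-style pairing: find t with T(t) <= num-1 < T(t+1)
--     # by binary search (no math import available), then read off x and y in O(1).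
--     if num < 1:
--         return None
--     m = num - 1
--     lo, hi = 0, 131072  # T(131072) > 2**31 >= m, so the answer lies in [lo, hi]
--     while lo < hi:
--         mid = (lo + hi + 1) // 2
--         if mid * (mid + 1) // 2 <= m:
--             lo = mid
--         else:
--             hi = mid - 1
--     t = lo
--     x = m - t * (t + 1) // 2 + 1
--     y = t + 2 - x
--     if x < 300 and y < 300:
--         return (x, y)
--     return None
-- ===== Notes on version B (the rewrite author's own statement) =====
-- stated objective: faster
-- what changed: Replaces the bounded double scan of the 299x299 grid with a direct inversion of the pairing: a binary search for the diagonal index t with T(t) <= num-1 < T(t+1), then x and y by O(1) arithmetic.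
import Mathlib
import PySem

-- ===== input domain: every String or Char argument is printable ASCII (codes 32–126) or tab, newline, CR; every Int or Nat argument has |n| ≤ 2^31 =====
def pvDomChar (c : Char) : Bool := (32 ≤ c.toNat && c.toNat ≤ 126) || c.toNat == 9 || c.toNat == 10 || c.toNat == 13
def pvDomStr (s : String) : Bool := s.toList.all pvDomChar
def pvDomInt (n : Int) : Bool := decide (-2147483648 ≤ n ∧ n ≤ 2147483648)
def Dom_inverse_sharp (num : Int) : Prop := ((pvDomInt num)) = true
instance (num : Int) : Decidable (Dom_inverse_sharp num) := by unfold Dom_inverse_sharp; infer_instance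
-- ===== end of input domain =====

-- B replaces A's double scan of the 299×299 grid with a direct inversion of the pairing:
-- a binary search for the diagonal index followed by O(1) arithmetic.

-- ===== PORT A =====
def sharpFn (x y : Int) : Int :=
  let tmp := x + y - 2
  PySem.Int.floordiv (tmp * (tmp + 1)) 2 + x

-- inner 'for j' loop: 'some r' = early return, 'none' = break or loop exhausted
def innerA (num i : Int) : List Int → Option (List Int)
  | [] => none
  | j :: js =>
    let tmp := sharpFn i j
    if tmp = num then some [i, j]
    else if tmp > num then none
    else innerA num i js

-- outer 'for i' loop
def outerA (num : Int) : List Int → Option (List Int)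
  | [] => none
  | i :: is =>
    match innerA num i (PySem.List.pyRange 1 300 1) with
    | some r => some r
    | none => outerA num is

def inverse_sharp (num : Int) : Option (List Int) :=
  outerA num (PySem.List.pyRange 1 300 1)

-- ===== PORT B =====
-- midpoint bound cited by the port's termination argument
theorem bsearch_mid_bounds {lo hi : Int} (h : lo < hi) :
    lo + 1 ≤ PySem.Int.floordiv (lo + hi + 1) 2 ∧ PySem.Int.floordiv (lo + hi + 1) 2 ≤ hi := by
  rw [PySem.Int.floordiv_eq_ediv_of_pos (by norm_num)]
  omega

-- the 'while lo < hi' binary search of Source B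
def bsearchB (m lo hi : Int) : Int :=
  if h : lo < hi then
    let mid := PySem.Int.floordiv (lo + hi + 1) 2
    if PySem.Int.floordiv (mid * (mid + 1)) 2 ≤ m then bsearchB m mid hi
    else bsearchB m lo (mid - 1)
  else lo
termination_by (hi - lo).toNat
decreasing_by
  · have := bsearch_mid_bounds h; omega
  · have := bsearch_mid_bounds h; omega

def inverse_sharp_alt (num : Int) : Option (List Int) :=
  if num < 1 then none
  else
    let m := num - 1
    let t := bsearchB m 0 131072
    let x := m - PySem.Int.floordiv (t * (t + 1)) 2 + 1
    let y := t + 2 - x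
    if x < 300 ∧ y < 300 then some [x, y] else none

-- ===== PRECONDITION & SPEC =====
def Spec_inverse_sharp (num : Int) (out : Option (List Int)) : Prop := out = inverse_sharp_alt num
instance (num : Int) (out : Option (List Int)) : Decidable (Spec_inverse_sharp num out) := by unfold Spec_inverse_sharp; infer_instance

-- ===== CLAIM (what is proved, stated in full; the proofs are below) =====
def Claim_equal_inverse_sharp : Prop := ∀ (num : Int), Dom_inverse_sharp num → Spec_inverse_sharp num (inverse_sharp num)

-- ===== LEMMAS AND PROOFS =====

-- t*(t+1) is even, so the floor division in T t = t*(t+1)//2 is exact (doubled form)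
theorem tri_two (t : Int) : 2 * PySem.Int.floordiv (t * (t + 1)) 2 = t * (t + 1) := by
  obtain ⟨k, hk⟩ := Int.even_mul_succ_self t
  rw [PySem.Int.floordiv_eq_ediv_of_pos (by norm_num)]
  omega

-- strict growth of T along a diagonal step
theorem tri_step {s s' : Int} (hs : 0 ≤ s) (h : s < s') :
    PySem.Int.floordiv (s * (s + 1)) 2 + s + 1 ≤ PySem.Int.floordiv (s' * (s' + 1)) 2 := by
  have h1 := tri_two s
  have h2 := tri_two s'
  nlinarith [h1, h2]

-- sharp is strictly increasing in its second argument (first ≥ 1)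
theorem sharp_mono {x j j' : Int} (hx : 1 ≤ x) (hj : 1 ≤ j) (h : j < j') :
    sharpFn x j < sharpFn x j' := by
  have := tri_step (s := x + j - 2) (s' := x + j' - 2) (by omega) (by omega)
  simp only [sharpFn]
  omega

-- injectivity of sharp on positive pairs
theorem sharp_inj {x y x' y' : Int} (hx : 1 ≤ x) (hy : 1 ≤ y) (hx' : 1 ≤ x') (hy' : 1 ≤ y')
    (h : sharpFn x y = sharpFn x' y') : x = x' ∧ y = y' := by
  simp only [sharpFn] at h
  rcases lt_trichotomy (x + y - 2) (x' + y' - 2) with hlt | heq | hgt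
  · have := tri_step (s := x + y - 2) (s' := x' + y' - 2) (by omega) hlt
    omega
  · rw [heq] at h; omega
  · have := tri_step (s := x' + y' - 2) (s' := x + y - 2) (by omega) hgt
    omega

theorem sharp_pos {i j : Int} (hi : 1 ≤ i) (hj : 1 ≤ j) : 1 ≤ sharpFn i j := by
  have h1 := tri_two (i + j - 2)
  simp only [sharpFn]
  nlinarith

-- the binary search returns the t with T t ≤ m < T (t+1)
theorem bsearch_ok (m lo hi : Int) (hle : lo ≤ hi)
    (h1 : PySem.Int.floordiv (lo * (lo + 1)) 2 ≤ m)
    (h2 : m < PySem.Int.floordiv ((hi + 1) * (hi + 1 + 1)) 2) :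
    PySem.Int.floordiv (bsearchB m lo hi * (bsearchB m lo hi + 1)) 2 ≤ m ∧
    m < PySem.Int.floordiv ((bsearchB m lo hi + 1) * (bsearchB m lo hi + 1 + 1)) 2 ∧
    lo ≤ bsearchB m lo hi := by
  fun_induction bsearchB m lo hi with
  | case1 lo hi h mid hcond ih =>
    have hb := bsearch_mid_bounds h
    exact (fun r => ⟨r.1, r.2.1, by omega⟩) (ih (by omega) hcond h2)
  | case2 lo hi h mid hcond ih =>
    have hb := bsearch_mid_bounds h
    have : m < PySem.Int.floordiv ((mid - 1 + 1) * (mid - 1 + 1 + 1)) 2 := by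
      simpa using (by omega : m < PySem.Int.floordiv (mid * (mid + 1)) 2)
    exact (fun r => ⟨r.1, r.2.1, r.2.2⟩) (ih (by omega) h1 this)
  | case3 lo hi h =>
    have : lo = hi := by omega
    subst this
    exact ⟨h1, h2, le_refl _⟩

-- the inner loop returns nothing when its row has no solution in range
theorem innerA_none {num i : Int} :
    ∀ L : List Int, (∀ j ∈ L, sharpFn i j ≠ num) → innerA num i L = none := by
  intro L
  induction L with
  | nil => intro _; rfl
  | cons j js ih =>
    intro h
    simp only [innerA]
    rw [if_neg (h j (by simp))]
    split
    · rfl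
    · exact ih (fun k hk => h k (by simp [hk]))

-- the inner loop reaches and returns the unique solution of its row
theorem innerA_hit {num x y : Int} (hx : 1 ≤ x) (hy : 1 ≤ y) (hy' : y ≤ 299)
    (hs : sharpFn x y = num) :
    ∀ j : Int, 1 ≤ j → j ≤ y → innerA num x (PySem.List.pyRange j 300 1) = some [x, y] := by
  intro j h1 h2
  induction hn : (y - j).toNat generalizing j with
  | zero =>
    have hj : j = y := by omega
    subst hj
    rw [PySem.List.pyRange_one_cons (by omega)]
    simp only [innerA]
    rw [if_pos hs]
  | succ n ih =>
    have hjy : j < y := by omega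
    rw [PySem.List.pyRange_one_cons (by omega)]
    simp only [innerA]
    have hlt : sharpFn x j < num := hs ▸ sharp_mono hx h1 hjy
    rw [if_neg (by omega), if_neg (by omega)]
    exact ih (j + 1) (by omega) (by omega) (by omega)

-- the outer loop returns nothing when every row does
theorem outerA_none {num : Int} :
    ∀ L : List Int, (∀ i ∈ L, innerA num i (PySem.List.pyRange 1 300 1) = none) →
    outerA num L = none := by
  intro L
  induction L with
  | nil => intro _; rfl
  | cons i is ih =>
    intro h
    simp only [outerA]
    rw [h i (by simp)]
    exact ih (fun k hk => h k (by simp [hk]))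

-- the outer loop reaches the solution row and returns its answer
theorem outerA_hit {num x y : Int} (hx : 1 ≤ x) (hx' : x ≤ 299) (hy : 1 ≤ y) (hy' : y ≤ 299)
    (hs : sharpFn x y = num)
    (hrow : ∀ i : Int, 1 ≤ i → i < x → innerA num i (PySem.List.pyRange 1 300 1) = none) :
    ∀ a : Int, 1 ≤ a → a ≤ x → outerA num (PySem.List.pyRange a 300 1) = some [x, y] := by
  intro a h1 h2
  induction hn : (x - a).toNat generalizing a with
  | zero =>
    have ha : a = x := by omega
    subst ha
    rw [PySem.List.pyRange_one_cons (by omega)]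
    simp only [outerA]
    rw [innerA_hit hx hy hy' hs 1 (by omega) hy]
  | succ n ih =>
    rw [PySem.List.pyRange_one_cons (by omega)]
    simp only [outerA]
    rw [hrow a h1 (by omega)]
    exact ih (a + 1) (by omega) (by omega) (by omega)

-- ===== VERDICT (by name: the statement is the Claim_ definition above) =====
theorem inverse_sharp_spec : Claim_equal_inverse_sharp := by
  intro num hdom
  show inverse_sharp num = inverse_sharp_alt num
  simp only [Dom_inverse_sharp, pvDomInt, decide_eq_true_eq] at hdom
  by_cases hneg : num < 1
  · rw [inverse_sharp_alt, if_pos hneg]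
    apply outerA_none
    intro i hi
    apply innerA_none
    intro j hj heq
    rw [PySem.List.mem_pyRange_one] at hi hj
    have := sharp_pos (i := i) (j := j) (by omega) (by omega)
    omega
  · set m := num - 1 with hm
    set t := bsearchB m 0 131072 with htdef
    obtain ⟨ht1, ht2, ht0⟩ := bsearch_ok m 0 131072 (by norm_num)
      (by rw [show ((0:Int)) * (0 + 1) = 0 by ring,
              PySem.Int.floordiv_eq_ediv_of_pos (by norm_num : (0:Int) < 2)]; omega)
      (by have h131 := tri_two 131073
          norm_num at h131 ⊢
          omega)
    rw [← htdef] at ht1 ht2 ht0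
    set x := m - PySem.Int.floordiv (t * (t + 1)) 2 + 1 with hxdef
    set y := t + 2 - x with hydef
    have hrel : (t + 1) * (t + 1 + 1) = t * (t + 1) + 2 * (t + 1) := by ring
    have h2t := tri_two t
    have h2t1 := tri_two (t + 1)
    have hx : 1 ≤ x := by omega
    have hxle : x ≤ t + 1 := by omega
    have hyn : 1 ≤ y := by omega
    have hsxy : sharpFn x y = num := by
      simp only [sharpFn]
      have hst : x + y - 2 = t := by omega
      rw [hst]
      omega
    have halt : inverse_sharp_alt num = if x < 300 ∧ y < 300 then some [x, y] else none := by
      rw [inverse_sharp_alt, if_neg hneg]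
    rw [halt]
    by_cases hcond : x < 300 ∧ y < 300
    · rw [if_pos hcond]
      apply outerA_hit hx (by omega) hyn (by omega) hsxy _ 1 (by omega) hx
      intro i hi1 hix
      apply innerA_none
      intro j hj heq
      rw [PySem.List.mem_pyRange_one] at hj
      have := sharp_inj hi1 (by omega : (1:Int) ≤ j) hx hyn (heq.trans hsxy.symm)
      omega
    · rw [if_neg hcond]
      apply outerA_none
      intro i hi
      apply innerA_none
      intro j hj heq
      rw [PySem.List.mem_pyRange_one] at hi hj
      have := sharp_inj (by omega : (1:Int) ≤ i) (by omega : (1:Int) ≤ j) hx hyn (heq.trans hsxy.symm)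
      rw [not_and_or] at hcond
      omega
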